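-- pv_equiv track=rewrite | github.com/LarkLucifer/GhillieSuite-EX | ghilliesuite_ex/agents/reporter.py | _extract_evidence_paths
-- ===== SOURCE A (Python) =====
-- def _safe_text(value) -> str:
--     if value is None:
--         return ""
--     if isinstance(value, bytes):
--         return value.decode("utf-8", errors="replace")
--     if isinstance(value, str):
--         try:
--             value.encode("utf-8")
--             return value
--         except UnicodeEncodeError:
--             return value.encode("utf-8", errors="replace").decode("utf-8", errors="replace")
--     try:
--         text = str(value)
--     except Exception:
--         return ""
--     try:
--         text.encode("utf-8")
--         return text
--     except UnicodeEncodeError: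
--         return text.encode("utf-8", errors="replace").decode("utf-8", errors="replace")
--
-- def _extract_evidence_paths(text: str) -> tuple[str, str]:
--     """Extract evidence request/response file paths from a finding's evidence text."""
--     text = _safe_text(text)
--     req_path = ""
--     res_path = ""
--     for line in (text or "").splitlines():
--         if "Request:" in line:
--             req_path = line.split("Request:", 1)[-1].strip()
--         if "Response:" in line:
--             res_path = line.split("Response:", 1)[-1].strip()
--     return req_path, res_path
-- ===== SOURCE B (Python) =====
-- def _safe_text(value) -> str:
--     if value is None:
--         return ""
--     if isinstance(value, bytes):
--         return value.decode("utf-8", errors="replace")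
--     if isinstance(value, str):
--         try:
--             value.encode("utf-8")
--             return value
--         except UnicodeEncodeError:
--             return value.encode("utf-8", errors="replace").decode("utf-8", errors="replace")
--     try:
--         text = str(value)
--     except Exception:
--         return ""
--     try:
--         text.encode("utf-8")
--         return text
--     except UnicodeEncodeError:
--         return text.encode("utf-8", errors="replace").decode("utf-8", errors="replace")
--
-- def _extract_evidence_paths(text: str) -> tuple[str, str]:
--     """Extract evidence request/response file paths from a finding's evidence text."""
--     text = _safe_text(text)
--     req_path = ""
--     res_path = ""
--     req_found = False
--     res_found = False
--     for line in reversed((text or "").splitlines()):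
--         if not req_found and "Request:" in line:
--             req_path = line.split("Request:", 1)[-1].strip()
--             req_found = True
--         if not res_found and "Response:" in line:
--             res_path = line.split("Response:", 1)[-1].strip()
--             res_found = True
--         if req_found and res_found:
--             break
--     return req_path, res_path
-- ===== Notes on version B (the rewrite author's own statement) =====
-- stated objective: alternative
-- what changed: B scans the lines in reverse with two found-flags and stops as soon as both paths are captured (first match in reverse = A's last-overwrite forward fold), instead of A's unconditional forward loop that overwrites on every match.
import Mathlib
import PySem

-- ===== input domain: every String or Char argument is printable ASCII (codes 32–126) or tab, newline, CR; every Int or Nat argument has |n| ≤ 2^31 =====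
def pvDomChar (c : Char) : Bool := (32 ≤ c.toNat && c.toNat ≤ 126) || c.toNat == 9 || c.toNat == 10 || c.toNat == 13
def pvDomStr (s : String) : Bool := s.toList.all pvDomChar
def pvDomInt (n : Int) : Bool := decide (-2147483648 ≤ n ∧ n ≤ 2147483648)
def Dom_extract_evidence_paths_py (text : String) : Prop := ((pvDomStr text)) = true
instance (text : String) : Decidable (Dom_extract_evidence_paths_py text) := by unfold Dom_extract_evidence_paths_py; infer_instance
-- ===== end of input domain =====

-- B replaces A's forward overwrite-on-every-match loop by a reverse scan with found-flags and an
-- early break once both paths are captured (alternative decomposition, same asymptotic cost).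
-- _safe_text is the identity on the str inputs of the ASCII domain, so both ports omit it.

-- ===== PORT A =====
-- line.split(marker, 1)[-1].strip()  (shared by both Pythons verbatim)
def pvAfter (line marker : String) : String :=
  PySem.Str.strip (((PySem.Str.splitMax? line marker 1).getD []).getLastD "")

-- the body of A's for-loop: overwrite a component whenever its marker occurs
def pvStepA (acc : String × String) (line : String) : String × String :=
  let req := if PySem.Str.isIn "Request:" line then pvAfter line "Request:" else acc.1
  let res := if PySem.Str.isIn "Response:" line then pvAfter line "Response:" else acc.2
  (req, res)

def extract_evidence_paths_py (text : String) : String × String :=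
  let lines := PySem.Str.splitlines (if text = "" then "" else text)
  lines.foldl pvStepA ("", "")

-- ===== PORT B =====
-- B's loop over reversed(lines): two found-flags, first match wins, break when both found
def pvScanRev : List String → Bool → Bool → String → String → String × String
  | [], _, _, req, res => (req, res)
  | line :: rest, reqF, resF, req, res =>
    let req' := if !reqF && PySem.Str.isIn "Request:" line then pvAfter line "Request:" else req
    let reqF' := reqF || PySem.Str.isIn "Request:" line
    let res' := if !resF && PySem.Str.isIn "Response:" line then pvAfter line "Response:" else res
    let resF' := resF || PySem.Str.isIn "Response:" line
    if reqF' && resF' then (req', res') else pvScanRev rest reqF' resF' req' res'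

def extract_evidence_paths_py_alt (text : String) : String × String :=
  let lines := PySem.Str.splitlines (if text = "" then "" else text)
  pvScanRev lines.reverse false false "" ""

-- ===== PRECONDITION & SPEC =====
def Spec_extract_evidence_paths_py (text : String) (out : String × String) : Prop := out = extract_evidence_paths_py_alt text
instance (text : String) (out : String × String) : Decidable (Spec_extract_evidence_paths_py text out) := by unfold Spec_extract_evidence_paths_py; infer_instance

-- ===== CLAIM (what is proved, stated in full; the proofs are below) =====
def Claim_equal_extract_evidence_paths_py : Prop := ∀ (text : String), Dom_extract_evidence_paths_py text → Spec_extract_evidence_paths_py text (extract_evidence_paths_py text)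

-- ===== LEMMAS AND PROOFS =====

-- value of the FIRST line of the list containing the marker (default d)
def pvFirst (marker : String) : List String → String → String
  | [], d => d
  | l :: rest, d => if PySem.Str.isIn marker l then pvAfter l marker else pvFirst marker rest d

theorem pvScanRev_eq (rl : List String) : ∀ (reqF resF : Bool) (req res : String),
    pvScanRev rl reqF resF req res =
      ((if reqF then req else pvFirst "Request:" rl req),
       (if resF then res else pvFirst "Response:" rl res)) := by
  induction rl with
  | nil => intro reqF resF req res; cases reqF <;> cases resF <;> simp [pvScanRev, pvFirst]
  | cons l rest ih =>
    intro reqF resF req res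
    simp only [pvScanRev, pvFirst]
    cases reqF <;> cases resF <;>
      by_cases h1 : PySem.Chars.isIn ['R','e','q','u','e','s','t',':'] l.toList = true <;>
      by_cases h2 : PySem.Chars.isIn ['R','e','s','p','o','n','s','e',':'] l.toList = true <;>
      simp [h1, h2, ih]

theorem pvFold_eq (rl : List String) : ∀ (req res : String),
    List.foldl pvStepA (req, res) rl.reverse =
      (pvFirst "Request:" rl req, pvFirst "Response:" rl res) := by
  induction rl with
  | nil => intro req res; simp [pvFirst]
  | cons l rest ih =>
    intro req res
    simp only [List.reverse_cons, List.foldl_append, ih, pvFirst, List.foldl]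
    by_cases h1 : PySem.Chars.isIn ['R','e','q','u','e','s','t',':'] l.toList = true <;>
      by_cases h2 : PySem.Chars.isIn ['R','e','s','p','o','n','s','e',':'] l.toList = true <;>
      simp [pvStepA, h1, h2]

-- ===== VERDICT (by name: the statement is the Claim_ definition above) =====
theorem extract_evidence_paths_py_spec : Claim_equal_extract_evidence_paths_py := by
  intro text _
  unfold Spec_extract_evidence_paths_py extract_evidence_paths_py extract_evidence_paths_py_alt
  have h := pvFold_eq ((PySem.Str.splitlines (if text = "" then "" else text)).reverse) "" ""
  rw [List.reverse_reverse] at h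
  rw [h, pvScanRev_eq]
  simp
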